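-- pv_equiv track=rewrite | github.com/luv1327/Scaler_Dsa | AdvanceDsa3/problemSolvingSession.py | canEliminateBoringSubstring
-- ===== SOURCE A (Python) =====
-- def canEliminateBoringSubstring(A):
--     n = len(A)
--     s1 = set()
--     s2 = set()
--     for i in range(n):
--         num = ord(A[i])
--         if num % 2 != 0:
--             s1.add(A[i])
--         else:
--             s2.add(A[i])
--     for x in s1:
--         target_idx = ord(x) + 3
--         for i in range(target_idx,ord('z') + 1,2):
--             if chr(i) in s2:
--                 return True
--     return False
-- ===== SOURCE B (Python) =====
-- def canEliminateBoringSubstring(A):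
--     odds = [ord(c) for c in A if ord(c) % 2 != 0]
--     evens = [ord(c) for c in A if ord(c) % 2 == 0 and ord(c) <= ord('z')]
--     if not odds or not evens:
--         return False
--     return max(evens) - min(odds) >= 3
-- ===== Notes on version B (the rewrite author's own statement) =====
-- stated objective: simpler
-- what changed: Replaces A's nested scan (for each odd-ord char, probe every even code up to code 122 against the even-char set) with one filtering pass collecting odd ords and even ords <= code 122, then a single max(evens)-min(odds) >= 3 comparison.
import Mathlib
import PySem

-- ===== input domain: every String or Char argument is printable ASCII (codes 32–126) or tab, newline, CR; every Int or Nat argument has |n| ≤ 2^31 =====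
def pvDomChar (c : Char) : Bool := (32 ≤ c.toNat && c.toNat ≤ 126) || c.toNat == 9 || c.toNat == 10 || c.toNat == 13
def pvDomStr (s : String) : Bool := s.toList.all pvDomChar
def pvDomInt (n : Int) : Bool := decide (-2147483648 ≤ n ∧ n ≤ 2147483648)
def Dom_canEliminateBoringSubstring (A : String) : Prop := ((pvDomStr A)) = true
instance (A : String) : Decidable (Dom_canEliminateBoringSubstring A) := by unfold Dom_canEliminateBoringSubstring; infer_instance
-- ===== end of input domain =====

-- B replaces A's nested scan (every odd char × every even code up to 122) by one pass
-- collecting the odd ords and the even ords ≤ 122, then a single max/min comparison (simpler, no nested loop).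

-- ===== PORT A =====
-- 'for x in s1' with an early 'return True' is ported as '.any' over the set's elements:
-- the boolean result does not depend on the (unmodelled) set iteration order.
def canEliminateBoringSubstring (A : String) : Bool :=
  let cs := A.toList
  let n : Int := (cs.length : Int)
  let st := (PySem.List.pyRange 0 n 1).foldl
    (fun (st : PySem.Set Char × PySem.Set Char) i =>
      let c := PySem.List.pyGetD cs i ' '   -- A[i]; i ∈ range(n) is always in range
      if c.toNat % 2 ≠ 0 then (st.1.add c, st.2) else (st.1, st.2.add c))
    (PySem.Set.empty, PySem.Set.empty)
  st.1.any (fun x =>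
    (PySem.List.pyRange ((x.toNat : Int) + 3) 123 2).any
      (fun i => st.2.contains (Char.ofNat i.toNat)))

-- ===== PORT B =====
def canEliminateBoringSubstring_alt (A : String) : Bool :=
  let odds := (A.toList.filter (fun c => c.toNat % 2 != 0)).map (fun c => (c.toNat : Int))
  let evens := (A.toList.filter (fun c => c.toNat % 2 == 0 && c.toNat ≤ 122)).map (fun c => (c.toNat : Int))
  if odds.isEmpty || evens.isEmpty then false
  else decide (((PySem.List.max? evens (fun x => x)).getD 0)
                - ((PySem.List.min? odds (fun x => x)).getD 0) ≥ 3)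

-- ===== PRECONDITION & SPEC =====
def Spec_canEliminateBoringSubstring (A : String) (out : Bool) : Prop := out = canEliminateBoringSubstring_alt A
instance (A : String) (out : Bool) : Decidable (Spec_canEliminateBoringSubstring A out) := by unfold Spec_canEliminateBoringSubstring; infer_instance

-- ===== CLAIM (what is proved, stated in full; the proofs are below) =====
def Claim_equal_canEliminateBoringSubstring : Prop := ∀ (A : String), Dom_canEliminateBoringSubstring A → Spec_canEliminateBoringSubstring A (canEliminateBoringSubstring A)

-- ===== LEMMAS AND PROOFS =====

-- Both programs decide this proposition: some odd-ord char o and some even-ord char e ≤ 'z' with ord e ≥ ord o + 3.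
def pvPair (cs : List Char) : Prop :=
  ∃ o ∈ cs, o.toNat % 2 = 1 ∧ ∃ e ∈ cs, e.toNat % 2 = 0 ∧ e.toNat ≤ 122 ∧ o.toNat + 3 ≤ e.toNat

theorem pv_charOfNat_toNat (n : Nat) (h : n ≤ 122) : (Char.ofNat n).toNat = n := by
  unfold Char.ofNat
  rw [dif_pos (by constructor; omega)]
  rfl

theorem pv_fold_split (cs : List Char) (s1 s2 : PySem.Set Char) :
    cs.foldl (fun (st : PySem.Set Char × PySem.Set Char) c =>
        if c.toNat % 2 ≠ 0 then (st.1.add c, st.2) else (st.1, st.2.add c)) (s1, s2)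
    = (s1.update (cs.filter (fun c => decide (c.toNat % 2 ≠ 0))),
       s2.update (cs.filter (fun c => !decide (c.toNat % 2 ≠ 0)))) := by
  induction cs generalizing s1 s2 with
  | nil => simp [PySem.Set.update]
  | cons c t ih =>
      simp only [List.foldl_cons, List.filter_cons]
      by_cases h : c.toNat % 2 ≠ 0
      · rw [if_pos h, ih]; simp [h, PySem.Set.update]
      · rw [if_neg h, ih]; simp [h, PySem.Set.update]

theorem pvA_iff (A : String) : canEliminateBoringSubstring A = true ↔ pvPair A.toList := by
  show (((PySem.List.pyRange 0 ((A.toList.length : Int)) 1).foldl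
    (fun (st : PySem.Set Char × PySem.Set Char) i =>
      if (PySem.List.pyGetD A.toList i ' ').toNat % 2 ≠ 0 then (st.1.add (PySem.List.pyGetD A.toList i ' '), st.2) else (st.1, st.2.add (PySem.List.pyGetD A.toList i ' ')))
    (PySem.Set.empty, PySem.Set.empty)).1.any (fun x =>
    (PySem.List.pyRange ((x.toNat : Int) + 3) 123 2).any
      (fun i => ((PySem.List.pyRange 0 ((A.toList.length : Int)) 1).foldl
    (fun (st : PySem.Set Char × PySem.Set Char) i =>
      if (PySem.List.pyGetD A.toList i ' ').toNat % 2 ≠ 0 then (st.1.add (PySem.List.pyGetD A.toList i ' '), st.2) else (st.1, st.2.add (PySem.List.pyGetD A.toList i ' ')))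
    (PySem.Set.empty, PySem.Set.empty)).2.contains (Char.ofNat i.toNat)))) = true ↔ pvPair A.toList
  rw [PySem.List.foldl_pyRange_zero_pyGetD' A.toList ' '
        (fun (st : PySem.Set Char × PySem.Set Char) c =>
          if c.toNat % 2 ≠ 0 then (st.1.add c, st.2) else (st.1, st.2.add c))
        (PySem.Set.empty, PySem.Set.empty),
      pv_fold_split]
  rw [List.any_eq_true]
  constructor
  · rintro ⟨x, hx, hin⟩
    have hx' : x ∈ A.toList ∧ x.toNat % 2 ≠ 0 := by
      simpa [PySem.Set.mem_update, PySem.Set.empty, List.mem_filter] using hx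
    rw [List.any_eq_true] at hin
    obtain ⟨i, hi, hc⟩ := hin
    rw [PySem.List.mem_pyRange_iff_of_pos (by norm_num)] at hi
    have he : Char.ofNat i.toNat ∈ PySem.Set.update PySem.Set.empty
        (A.toList.filter (fun c => !decide (c.toNat % 2 ≠ 0))) := by
      simpa [PySem.Set.contains] using hc
    have he' : Char.ofNat i.toNat ∈ A.toList ∧ (Char.ofNat i.toNat).toNat % 2 = 0 := by
      simpa [PySem.Set.mem_update, PySem.Set.empty, List.mem_filter]
        using he
    have hnn : (0 : Int) ≤ i := by omega
    have htn : (Char.ofNat i.toNat).toNat = i.toNat := pv_charOfNat_toNat _ (by omega)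
    refine ⟨x, hx'.1, by omega, Char.ofNat i.toNat, he'.1, he'.2, by omega, by omega⟩
  · rintro ⟨o, ho, hodd, e, he, heven, hle, hge⟩
    refine ⟨o, ?_, ?_⟩
    · simp [PySem.Set.mem_update, PySem.Set.empty, List.mem_filter, ho]
      omega
    · rw [List.any_eq_true]
      refine ⟨(e.toNat : Int), ?_, ?_⟩
      · rw [PySem.List.mem_pyRange_iff_of_pos (by norm_num)]
        refine ⟨by omega, by omega, ?_⟩
        omega
      · have : (Char.ofNat ((e.toNat : Int)).toNat) = e := by
          rw [Int.toNat_natCast, Char.ofNat_toNat]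
        rw [this]
        simp [PySem.Set.contains, PySem.Set.mem_update, PySem.Set.empty, List.mem_filter, he]
        omega

theorem pvB_iff (A : String) : canEliminateBoringSubstring_alt A = true ↔ pvPair A.toList := by
  show ((if ((A.toList.filter (fun c => c.toNat % 2 != 0)).map (fun c => (c.toNat : Int))).isEmpty
          || ((A.toList.filter (fun c => c.toNat % 2 == 0 && c.toNat ≤ 122)).map (fun c => (c.toNat : Int))).isEmpty
       then false
       else decide (((PySem.List.max? ((A.toList.filter (fun c => c.toNat % 2 == 0 && c.toNat ≤ 122)).map (fun c => (c.toNat : Int))) (fun x => x)).getD 0)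
                - ((PySem.List.min? ((A.toList.filter (fun c => c.toNat % 2 != 0)).map (fun c => (c.toNat : Int))) (fun x => x)).getD 0) ≥ 3)) = true)
    ↔ pvPair A.toList
  constructor
  · intro h
    split at h
    · exact absurd h (by simp)
    · rename_i hne
      rw [Bool.or_eq_true, not_or] at hne
      obtain ⟨ho, he⟩ := hne
      simp only [Bool.not_eq_true, List.isEmpty_eq_false_iff] at ho he
      obtain ⟨m, hm⟩ : ∃ m, PySem.List.max? ((A.toList.filter (fun c => c.toNat % 2 == 0 && c.toNat ≤ 122)).map (fun c => (c.toNat : Int))) (fun x => x) = some m := by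
        cases hx : PySem.List.max? ((A.toList.filter (fun c => c.toNat % 2 == 0 && c.toNat ≤ 122)).map (fun c => (c.toNat : Int))) (fun x => x) with
        | none => exact absurd ((PySem.List.max?_eq_none_iff _ _).mp hx) he
        | some v => exact ⟨v, rfl⟩
      obtain ⟨mo, hmo⟩ : ∃ mo, PySem.List.min? ((A.toList.filter (fun c => c.toNat % 2 != 0)).map (fun c => (c.toNat : Int))) (fun x => x) = some mo := by
        cases hx : PySem.List.min? ((A.toList.filter (fun c => c.toNat % 2 != 0)).map (fun c => (c.toNat : Int))) (fun x => x) with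
        | none => exact absurd ((PySem.List.min?_eq_none_iff _ _).mp hx) ho
        | some v => exact ⟨v, rfl⟩
      rw [hm, hmo] at h
      simp only [Option.getD_some, decide_eq_true_eq] at h
      obtain ⟨e, hef, hev⟩ := List.mem_map.mp (PySem.List.max?_mem hm)
      obtain ⟨o, hof, hov⟩ := List.mem_map.mp (PySem.List.min?_mem hmo)
      rw [List.mem_filter] at hef hof
      simp only [bne_iff_ne, ne_eq, decide_eq_true_eq, Bool.and_eq_true, beq_iff_eq] at hef hof
      exact ⟨o, hof.1, by omega, e, hef.1, hef.2.1, hef.2.2, by omega⟩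
  · rintro ⟨o, ho, hodd, e, he, heven, hle, hge⟩
    have hom : (o.toNat : Int) ∈ (A.toList.filter (fun c => c.toNat % 2 != 0)).map (fun c => (c.toNat : Int)) :=
      List.mem_map.mpr ⟨o, List.mem_filter.mpr ⟨ho, by simp; omega⟩, rfl⟩
    have hem : (e.toNat : Int) ∈ (A.toList.filter (fun c => c.toNat % 2 == 0 && c.toNat ≤ 122)).map (fun c => (c.toNat : Int)) :=
      List.mem_map.mpr ⟨e, List.mem_filter.mpr ⟨he, by simp; omega⟩, rfl⟩
    rw [if_neg (by
      rw [Bool.or_eq_true, not_or]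
      simp only [Bool.not_eq_true, List.isEmpty_eq_false_iff]
      exact ⟨List.ne_nil_of_mem hom, List.ne_nil_of_mem hem⟩)]
    obtain ⟨m, hm⟩ : ∃ m, PySem.List.max? ((A.toList.filter (fun c => c.toNat % 2 == 0 && c.toNat ≤ 122)).map (fun c => (c.toNat : Int))) (fun x => x) = some m := by
      cases hx : PySem.List.max? ((A.toList.filter (fun c => c.toNat % 2 == 0 && c.toNat ≤ 122)).map (fun c => (c.toNat : Int))) (fun x => x) with
      | none => exact absurd ((PySem.List.max?_eq_none_iff _ _).mp hx ▸ hem) (List.not_mem_nil)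
      | some v => exact ⟨v, rfl⟩
    obtain ⟨mo, hmo⟩ : ∃ mo, PySem.List.min? ((A.toList.filter (fun c => c.toNat % 2 != 0)).map (fun c => (c.toNat : Int))) (fun x => x) = some mo := by
      cases hx : PySem.List.min? ((A.toList.filter (fun c => c.toNat % 2 != 0)).map (fun c => (c.toNat : Int))) (fun x => x) with
      | none => exact absurd ((PySem.List.min?_eq_none_iff _ _).mp hx ▸ hom) (List.not_mem_nil)
      | some v => exact ⟨v, rfl⟩
    rw [hm, hmo]
    have h1 : (e.toNat : Int) ≤ m := PySem.List.max?_isMax hm _ hem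
    have h2 : mo ≤ (o.toNat : Int) := PySem.List.min?_isMin hmo _ hom
    simp only [Option.getD_some, decide_eq_true_eq]
    omega

-- ===== VERDICT (by name: the statement is the Claim_ definition above) =====
theorem canEliminateBoringSubstring_spec : Claim_equal_canEliminateBoringSubstring := by
  intro A _
  unfold Spec_canEliminateBoringSubstring
  have h := (pvA_iff A).trans (pvB_iff A).symm
  cases hA : canEliminateBoringSubstring A <;> cases hB : canEliminateBoringSubstring_alt A <;> simp_all
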